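-- pv_equiv track=rewrite | github.com/lizhouf/semantic_triplets | extract_characterize/add_pvo.py | add_pvo
-- ===== SOURCE A (Python) =====
-- def add_pvo(the_string,v_3,v_2,v_1,p_3,p_2,p_1):  # perpetrator, victim, other
--
--     PVO_label = "O"
--     lemma_no_pron = the_string.split(" ")
--
--     for i in range(len(lemma_no_pron)):
--         # search 6 levels of dictionaries
--         if any(x in lemma_no_pron for x in p_3):
--             PVO_label = "P"
--             continue
--         elif any(x in lemma_no_pron for x in v_3):
--             PVO_label = "V"
--             continue
--         elif any(x in lemma_no_pron for x in p_2):
--             PVO_label = "P"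
--             continue
--         elif any(x in lemma_no_pron for x in v_2):
--             PVO_label = "V"
--             continue
--         elif any(x in lemma_no_pron for x in p_1):
--             PVO_label = "P"
--             continue
--         elif any(x in lemma_no_pron for x in v_1):
--             PVO_label = "V"
--             continue
--
--     return PVO_label
-- ===== SOURCE B (Python) =====
-- def add_pvo(the_string, v_3, v_2, v_1, p_3, p_2, p_1):
--     # Build one word -> priority-rank table (insert lowest priority first so the
--     # highest-priority collection wins for shared words), then make a single
--     # best-rank pass over the words of the_string.
--     rank = {}
--     for r, coll in ((6, v_1), (5, p_1), (4, v_2), (3, p_2), (2, v_3), (1, p_3)):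
--         rank.update(dict.fromkeys(coll, r))
--     best = 7
--     for w in the_string.split(" "):
--         best = min(best, rank.get(w, 7))
--     if best == 7:
--         return "O"
--     return "P" if best % 2 == 1 else "V"
-- ===== Notes on version B (the rewrite author's own statement) =====
-- stated objective: alternative
-- what changed: Replaced the per-word loop that rescans all six collections against the word list each round by a single word-to-priority-rank dict built once (lowest priority inserted first so the highest wins) plus one best-rank pass over the words.
import Mathlib
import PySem

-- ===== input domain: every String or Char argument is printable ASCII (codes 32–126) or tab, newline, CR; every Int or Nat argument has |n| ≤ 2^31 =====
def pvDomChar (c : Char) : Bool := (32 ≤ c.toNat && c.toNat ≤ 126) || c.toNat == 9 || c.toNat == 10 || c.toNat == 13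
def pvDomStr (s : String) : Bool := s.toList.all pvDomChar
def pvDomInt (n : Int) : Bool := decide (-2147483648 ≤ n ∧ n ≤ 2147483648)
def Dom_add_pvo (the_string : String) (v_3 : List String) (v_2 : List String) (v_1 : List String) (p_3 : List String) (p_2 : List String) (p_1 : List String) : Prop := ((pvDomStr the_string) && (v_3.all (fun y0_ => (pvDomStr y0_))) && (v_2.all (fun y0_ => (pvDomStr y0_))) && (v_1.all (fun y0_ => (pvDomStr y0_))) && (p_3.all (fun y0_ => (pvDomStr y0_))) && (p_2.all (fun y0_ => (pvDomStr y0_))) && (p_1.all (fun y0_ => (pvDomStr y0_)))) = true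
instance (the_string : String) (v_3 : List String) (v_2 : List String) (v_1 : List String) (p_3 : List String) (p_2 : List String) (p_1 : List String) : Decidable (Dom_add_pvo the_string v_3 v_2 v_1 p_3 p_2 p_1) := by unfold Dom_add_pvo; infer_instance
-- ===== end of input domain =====

-- B replaces A's repeated six-level any-scans (one round per word of the string) by a single
-- word→priority-rank table plus one best-rank pass over the words; same return value.

-- ===== PORT A =====
-- `the_string.split(" ")`: sep " " is nonempty, so split? is always `some`; `.getD []` is exact here.
def add_pvo (the_string : String) (v_3 : List String) (v_2 : List String) (v_1 : List String) (p_3 : List String) (p_2 : List String) (p_1 : List String) : String :=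
  let lemma_no_pron := (PySem.Str.split? the_string " ").getD []
  (PySem.List.pyRange 0 (lemma_no_pron.length : Int) 1).foldl
    (fun PVO_label _ =>
      if p_3.any (fun x => lemma_no_pron.contains x) then "P"
      else if v_3.any (fun x => lemma_no_pron.contains x) then "V"
      else if p_2.any (fun x => lemma_no_pron.contains x) then "P"
      else if v_2.any (fun x => lemma_no_pron.contains x) then "V"
      else if p_1.any (fun x => lemma_no_pron.contains x) then "P"
      else if v_1.any (fun x => lemma_no_pron.contains x) then "V"
      else PVO_label)
    "O"

-- ===== PORT B =====
def add_pvo_alt (the_string : String) (v_3 : List String) (v_2 : List String) (v_1 : List String) (p_3 : List String) (p_2 : List String) (p_1 : List String) : String :=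
  let rank : PySem.Dict String Int :=
    [((6 : Int), v_1), (5, p_1), (4, v_2), (3, p_2), (2, v_3), (1, p_3)].foldl
      (fun d rc => rc.2.foldl (fun d w => d.insert w rc.1) d) PySem.Dict.empty
  let best : Int :=
    ((PySem.Str.split? the_string " ").getD []).foldl (fun b w => min b (rank.getD w 7)) 7
  if best == 7 then "O"
  else if PySem.Int.mod best 2 == 1 then "P" else "V"

-- ===== PRECONDITION & SPEC =====
def Spec_add_pvo (the_string : String) (v_3 : List String) (v_2 : List String) (v_1 : List String) (p_3 : List String) (p_2 : List String) (p_1 : List String) (out : String) : Prop := out = add_pvo_alt the_string v_3 v_2 v_1 p_3 p_2 p_1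
instance (the_string : String) (v_3 : List String) (v_2 : List String) (v_1 : List String) (p_3 : List String) (p_2 : List String) (p_1 : List String) (out : String) : Decidable (Spec_add_pvo the_string v_3 v_2 v_1 p_3 p_2 p_1 out) := by unfold Spec_add_pvo; infer_instance

-- ===== CLAIM (what is proved, stated in full; the proofs are below) =====
def Claim_equal_add_pvo : Prop := ∀ (the_string : String) (v_3 : List String) (v_2 : List String) (v_1 : List String) (p_3 : List String) (p_2 : List String) (p_1 : List String), Dom_add_pvo the_string v_3 v_2 v_1 p_3 p_2 p_1 → Spec_add_pvo the_string v_3 v_2 v_1 p_3 p_2 p_1 (add_pvo the_string v_3 v_2 v_1 p_3 p_2 p_1)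

-- ===== LEMMAS AND PROOFS =====

-- folding a function with f ∘ f = f over a nonempty list (state ignored by the index) is one application
theorem pvFoldlFix {α : Type} (f : α → α) (hf : ∀ s, f (f s) = f s) :
    ∀ (l : List Int) (s : α), l ≠ [] → l.foldl (fun a _ => f a) s = f s := by
  intro l
  induction l with
  | nil => intro s h; exact absurd rfl h
  | cons a t ih =>
    intro s _
    cases t with
    | nil => simp
    | cons b t' =>
      rw [List.foldl_cons, ih (f s) (by simp), hf]

-- inserting every element of c with value r, then looking w up
theorem pvGetDInsertList (c : List String) (r : Int) (d : PySem.Dict String Int) (w : String) :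
    (c.foldl (fun d x => d.insert x r) d).getD w 7
      = if c.contains w then r else d.getD w 7 := by
  induction c generalizing d with
  | nil => simp
  | cons x t ih =>
    simp only [List.foldl_cons, ih, PySem.Dict.getD_insert, List.contains_cons]
    by_cases hx : w = x <;> by_cases ht : t.contains w <;> simp [hx]

theorem pvLeFoldlMin (g : String → Int) (l : List String) (k init : Int)
    (h1 : k ≤ init) (h2 : ∀ w ∈ l, k ≤ g w) :
    k ≤ l.foldl (fun b w => min b (g w)) init := by
  induction l generalizing init with
  | nil => simpa using h1
  | cons a t ih =>
    simp only [List.foldl_cons]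
    exact ih (min init (g a)) (le_min h1 (h2 a (by simp)))
      (fun w hw => h2 w (by simp [hw]))

theorem pvFoldlMinLeInit (g : String → Int) (l : List String) (init : Int) :
    l.foldl (fun b w => min b (g w)) init ≤ init := by
  induction l generalizing init with
  | nil => simp
  | cons a t ih =>
    simp only [List.foldl_cons]
    exact le_trans (ih (min init (g a))) (min_le_left _ _)

theorem pvFoldlMinLe (g : String → Int) (l : List String) (init : Int) (w : String)
    (hw : w ∈ l) : l.foldl (fun b w => min b (g w)) init ≤ g w := by
  induction l generalizing init with
  | nil => cases hw
  | cons a t ih =>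
    simp only [List.foldl_cons]
    rcases List.mem_cons.mp hw with h | h
    · subst h
      exact le_trans (pvFoldlMinLeInit g t _) (min_le_right _ _)
    · exact ih _ h

theorem pvFoldlMinEq (g : String → Int) (l : List String) (k init : Int)
    (h1 : k ≤ init) (h2 : ∀ w ∈ l, k ≤ g w) (h3 : ∃ w ∈ l, g w = k) :
    l.foldl (fun b w => min b (g w)) init = k := by
  obtain ⟨w, hw, hgw⟩ := h3
  exact le_antisymm (hgw ▸ pvFoldlMinLe g l init w hw) (pvLeFoldlMin g l k init h1 h2)

-- any-over-collection vs any-over-words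
theorem pvAnyComm (c l : List String) :
    c.any (fun x => l.contains x) = true ↔ ∃ w ∈ l, w ∈ c := by
  simp only [List.any_eq_true, List.contains_iff_mem]
  exact ⟨fun ⟨x, h1, h2⟩ => ⟨x, h2, h1⟩, fun ⟨x, h1, h2⟩ => ⟨x, h2, h1⟩⟩

theorem pvAnyCommFalse (c l : List String) (h : ¬ c.any (fun x => l.contains x) = true) :
    ∀ w ∈ l, w ∉ c := by
  intro w hw hc
  exact h ((pvAnyComm c l).mpr ⟨w, hw, hc⟩)

-- ===== VERDICT (by name: the statement is the Claim_ definition above) =====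
theorem add_pvo_spec : Claim_equal_add_pvo := by
  intro the_string v_3 v_2 v_1 p_3 p_2 p_1 _
  unfold Spec_add_pvo add_pvo add_pvo_alt
  generalize (PySem.Str.split? the_string " ").getD [] = words
  set g : String → Int := fun w =>
    if p_3.contains w then (1 : Int) else if v_3.contains w then 2
    else if p_2.contains w then 3 else if v_2.contains w then 4
    else if p_1.contains w then 5 else if v_1.contains w then 6 else 7 with hg
  have hrank : ∀ w : String,
      (([((6 : Int), v_1), (5, p_1), (4, v_2), (3, p_2), (2, v_3), (1, p_3)].foldl
        (fun d rc => rc.2.foldl (fun d w => d.insert w rc.1) d)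
        (PySem.Dict.empty : PySem.Dict String Int)).getD w 7) = g w := by
    intro w
    simp only [List.foldl_cons, List.foldl_nil, pvGetDInsertList, hg]
    have hemp : (PySem.Dict.empty : PySem.Dict String Int).getD w 7 = 7 := by
      simp [PySem.Dict.getD, PySem.Dict.get?, PySem.Dict.empty]
    rw [hemp]
  simp only [hrank]
  have hg1 : ∀ w, 1 ≤ g w := by
    intro w; simp only [hg]; split_ifs <;> norm_num
  rcases words with _ | ⟨w0, rest⟩
  · -- empty word list: A folds over range(0), B folds over []
    simp [PySem.List.pyRange]
  · -- nonempty word list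
    have hlen : (0 : Int) < ((w0 :: rest).length : Int) := by
      simp only [List.length_cons]; positivity
    rw [PySem.List.pyRange_one_cons hlen]
    -- both sides now depend only on the six hit conditions
    set l := w0 :: rest with hl
    rw [pvFoldlFix (fun s => if p_3.any (fun x => l.contains x) = true then "P"
          else if v_3.any (fun x => l.contains x) = true then "V"
          else if p_2.any (fun x => l.contains x) = true then "P"
          else if v_2.any (fun x => l.contains x) = true then "V"
          else if p_1.any (fun x => l.contains x) = true then "P"
          else if v_1.any (fun x => l.contains x) = true then "V" else s)
        (by intro s; dsimp only; split_ifs <;> rfl) _ "O" (by simp)]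
    by_cases c1 : p_3.any (fun x => l.contains x) = true
    · obtain ⟨x, hxl, hxc⟩ := (pvAnyComm p_3 l).mp c1
      have hbest : l.foldl (fun b w => min b (g w)) 7 = 1 :=
        pvFoldlMinEq g l 1 7 (by norm_num) (fun w _ => hg1 w)
          ⟨x, hxl, by simp [hg, hxc]⟩
      rw [hbest, if_pos c1]
      decide
    · have n1 := pvAnyCommFalse p_3 l c1
      by_cases c2 : v_3.any (fun x => l.contains x) = true
      · obtain ⟨x, hxl, hxc⟩ := (pvAnyComm v_3 l).mp c2
        have hbest : l.foldl (fun b w => min b (g w)) 7 = 2 :=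
          pvFoldlMinEq g l 2 7 (by norm_num) (fun w hw => by simp [hg, n1 w hw]; split_ifs <;> norm_num)
            ⟨x, hxl, by simp [hg, n1 x hxl, hxc]⟩
        rw [hbest, if_neg c1, if_pos c2]
        decide
      · have n2 := pvAnyCommFalse v_3 l c2
        by_cases c3 : p_2.any (fun x => l.contains x) = true
        · obtain ⟨x, hxl, hxc⟩ := (pvAnyComm p_2 l).mp c3
          have hbest : l.foldl (fun b w => min b (g w)) 7 = 3 :=
            pvFoldlMinEq g l 3 7 (by norm_num) (fun w hw => by simp [hg, n1 w hw, n2 w hw]; split_ifs <;> norm_num)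
              ⟨x, hxl, by simp [hg, n1 x hxl, n2 x hxl, hxc]⟩
          rw [hbest, if_neg c1, if_neg c2, if_pos c3]
          decide
        · have n3 := pvAnyCommFalse p_2 l c3
          by_cases c4 : v_2.any (fun x => l.contains x) = true
          · obtain ⟨x, hxl, hxc⟩ := (pvAnyComm v_2 l).mp c4
            have hbest : l.foldl (fun b w => min b (g w)) 7 = 4 :=
              pvFoldlMinEq g l 4 7 (by norm_num) (fun w hw => by simp [hg, n1 w hw, n2 w hw, n3 w hw]; split_ifs <;> norm_num)
                ⟨x, hxl, by simp [hg, n1 x hxl, n2 x hxl, n3 x hxl, hxc]⟩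
            rw [hbest, if_neg c1, if_neg c2, if_neg c3, if_pos c4]
            decide
          · have n4 := pvAnyCommFalse v_2 l c4
            by_cases c5 : p_1.any (fun x => l.contains x) = true
            · obtain ⟨x, hxl, hxc⟩ := (pvAnyComm p_1 l).mp c5
              have hbest : l.foldl (fun b w => min b (g w)) 7 = 5 :=
                pvFoldlMinEq g l 5 7 (by norm_num) (fun w hw => by simp [hg, n1 w hw, n2 w hw, n3 w hw, n4 w hw]; split_ifs <;> norm_num)
                  ⟨x, hxl, by simp [hg, n1 x hxl, n2 x hxl, n3 x hxl, n4 x hxl, hxc]⟩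
              rw [hbest, if_neg c1, if_neg c2, if_neg c3, if_neg c4, if_pos c5]
              decide
            · have n5 := pvAnyCommFalse p_1 l c5
              by_cases c6 : v_1.any (fun x => l.contains x) = true
              · obtain ⟨x, hxl, hxc⟩ := (pvAnyComm v_1 l).mp c6
                have hbest : l.foldl (fun b w => min b (g w)) 7 = 6 :=
                  pvFoldlMinEq g l 6 7 (by norm_num) (fun w hw => by simp [hg, n1 w hw, n2 w hw, n3 w hw, n4 w hw, n5 w hw]; split_ifs <;> norm_num)
                    ⟨x, hxl, by simp [hg, n1 x hxl, n2 x hxl, n3 x hxl, n4 x hxl, n5 x hxl, hxc]⟩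
                rw [hbest, if_neg c1, if_neg c2, if_neg c3, if_neg c4, if_neg c5, if_pos c6]
                decide
              · have n6 := pvAnyCommFalse v_1 l c6
                have hbest : l.foldl (fun b w => min b (g w)) 7 = 7 := by
                  apply pvFoldlMinEq g l 7 7 le_rfl
                  · intro w hw
                    simp [hg, n1 w hw, n2 w hw, n3 w hw, n4 w hw, n5 w hw, n6 w hw]
                  · exact ⟨w0, by simp [hl], by simp [hg, n1 w0 (by simp [hl]), n2 w0 (by simp [hl]), n3 w0 (by simp [hl]), n4 w0 (by simp [hl]), n5 w0 (by simp [hl]), n6 w0 (by simp [hl])]⟩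
                rw [hbest, if_neg c1, if_neg c2, if_neg c3, if_neg c4, if_neg c5, if_neg c6]
                decide
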